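-- pv_equiv track=rewrite | github.com/Pulsar7/MultiTool | src/modules/person_lookup.py | get_person_formatted_fullname
-- ===== SOURCE A (Python) =====
-- def get_person_formatted_fullname(person_fullname:str) -> str:
--     formatted_fullname:str = ""
--     args:list[str] = person_fullname.split(" ")
--     for x,arg in enumerate(args):
--         formatted_fullname += arg.lower()
--         if x < len(args)-1:
--             formatted_fullname += "_"
--     return formatted_fullname
-- ===== SOURCE B (Python) =====
-- def get_person_formatted_fullname(person_fullname: str) -> str:
--     return person_fullname.lower().replace(" ", "_")
-- ===== Notes on version B (the rewrite author's own statement) =====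
-- stated objective: idiomatic
-- what changed: Replaced the split-into-tokens / enumerate loop with index-based separator logic by a single direct whole-string transformation: lowercase everything, then substitute the underscore character for each space character.
import Mathlib
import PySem

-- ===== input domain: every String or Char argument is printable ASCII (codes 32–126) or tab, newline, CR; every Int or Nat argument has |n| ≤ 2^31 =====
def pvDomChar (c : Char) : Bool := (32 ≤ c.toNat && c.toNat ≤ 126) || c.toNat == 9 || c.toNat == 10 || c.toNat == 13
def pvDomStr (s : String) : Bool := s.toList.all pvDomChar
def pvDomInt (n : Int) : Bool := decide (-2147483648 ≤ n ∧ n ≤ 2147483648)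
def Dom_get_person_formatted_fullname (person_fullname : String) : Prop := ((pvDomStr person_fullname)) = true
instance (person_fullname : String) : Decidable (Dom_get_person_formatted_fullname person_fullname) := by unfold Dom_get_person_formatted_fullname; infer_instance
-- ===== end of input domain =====

-- B replaces A's split/enumerate/join loop by one direct whole-string transformation
-- (lowercase, then substitute underscores for spaces): idiomatic.

-- ===== PORT A =====
-- A: split on " ", loop with enumerate lowering each token and appending "_" between tokens.
def get_person_formatted_fullname (person_fullname : String) : String :=
  let args : List (List Char) := PySem.Chars.splitOn person_fullname.toList [' ']
  let formatted : List Char :=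
    (PySem.List.enumerate args).foldl
      (fun acc p =>
        let acc' := acc ++ PySem.Chars.lower p.2
        if p.1 < (args.length : Int) - 1 then acc' ++ ['_'] else acc')
      []
  String.ofList formatted

-- ===== PORT B =====
def get_person_formatted_fullname_alt (person_fullname : String) : String :=
  PySem.Str.replace (PySem.Str.lower person_fullname) " " "_"

-- ===== PRECONDITION & SPEC =====
def Spec_get_person_formatted_fullname (person_fullname : String) (out : String) : Prop := out = get_person_formatted_fullname_alt person_fullname
instance (person_fullname : String) (out : String) : Decidable (Spec_get_person_formatted_fullname person_fullname out) := by unfold Spec_get_person_formatted_fullname; infer_instance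

-- ===== CLAIM (what is proved, stated in full; the proofs are below) =====
def Claim_equal_get_person_formatted_fullname : Prop := ∀ (person_fullname : String), Dom_get_person_formatted_fullname person_fullname → Spec_get_person_formatted_fullname person_fullname (get_person_formatted_fullname person_fullname)

-- ===== LEMMAS AND PROOFS =====

-- ' ' ↦ '_', all else unchanged (what single-char replace does pointwise)
def pvG (c : Char) : Char := if c = ' ' then '_' else c
-- the combined transformation both programs compute pointwise
def pvF (c : Char) : Char := if c = ' ' then '_' else PySem.Chars.lowerChar c

-- simple recursive model of splitting on a single space
def pvSplitParts : List Char → List Char → List (List Char)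
  | pre, [] => [pre]
  | pre, c :: t => if c = ' ' then pre :: pvSplitParts [] t else pvSplitParts (pre ++ [c]) t

-- simple recursive model of A's lower-and-'_'-join loop
def pvJoinTail : List (List Char) → List Char
  | [] => []
  | [a] => PySem.Chars.lower a
  | a :: b :: t => PySem.Chars.lower a ++ '_' :: pvJoinTail (b :: t)

theorem pv_lowerChar_eq_space_iff (c : Char) : PySem.Chars.lowerChar c = ' ' ↔ c = ' ' := by
  unfold PySem.Chars.lowerChar PySem.Chars.isupper
  split
  · rename_i h
    simp only [Bool.and_eq_true, decide_eq_true_eq] at h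
    have h1 : 65 ≤ c.toNat := h.1
    have h2 : c.toNat ≤ 90 := h.2
    constructor
    · intro he
      have h3 : (Char.ofNat (c.toNat + 32)).toNat = (' ').toNat := by rw [he]
      rw [Char.toNat_ofNat] at h3
      have hv : Nat.isValidChar (c.toNat + 32) := Or.inl (by omega)
      simp [hv] at h3
      exact absurd h3 (by omega)
    · intro he
      subst he
      exact absurd h1 (by decide)
  · simp

theorem pv_replace_go_single : ∀ (l : List Char) (fuel : Nat) (acc : List Char),
    l.length ≤ fuel →
    PySem.Chars.replace.go [' '] ['_'] fuel l acc = acc.reverse ++ l.map pvG := by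
  intro l
  induction l with
  | nil =>
    intro fuel acc _
    cases fuel <;> simp [PySem.Chars.replace.go]
  | cons c t ih =>
    intro fuel acc h
    cases fuel with
    | zero => simp at h
    | succ f =>
      simp only [PySem.Chars.replace.go, List.isPrefixOf]
      by_cases hc : c = ' '
      · subst hc
        simp only [BEq.rfl, Bool.true_and, if_pos]
        rw [show List.drop [' '].length (' ' :: t) = t from rfl]
        rw [ih f _ (by simpa using Nat.le_of_succ_le_succ h)]
        simp [pvG]
      · rw [if_neg (by simp; exact fun h => hc h.symm)]
        rw [ih f _ (Nat.le_of_succ_le_succ h)]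
        simp [pvG, hc]

theorem pv_replace_single_eq_map (cs : List Char) :
    PySem.Chars.replace cs [' '] ['_'] = cs.map pvG := by
  unfold PySem.Chars.replace
  rw [if_neg (by simp)]
  simpa using pv_replace_go_single cs cs.length [] (le_refl _)

theorem pv_splitOn_go_eq : ∀ (l : List Char) (fuel : Nat) (cur : List Char) (acc : List (List Char)),
    l.length < fuel →
    PySem.Chars.splitOn.go [' '] fuel l cur acc = acc.reverse ++ pvSplitParts cur.reverse l := by
  intro l
  induction l with
  | nil =>
    intro fuel cur acc h
    cases fuel with
    | zero => omega
    | succ f => simp [PySem.Chars.splitOn.go, pvSplitParts]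
  | cons c t ih =>
    intro fuel cur acc h
    cases fuel with
    | zero => omega
    | succ f =>
      simp only [PySem.Chars.splitOn.go, List.isPrefixOf]
      by_cases hc : c = ' '
      · subst hc
        simp only [BEq.rfl, Bool.true_and, if_pos]
        rw [show List.drop [' '].length (' ' :: t) = t from rfl]
        rw [ih f [] _ (by simpa using Nat.lt_of_succ_lt_succ h)]
        simp [pvSplitParts]
      · rw [if_neg (by simp; exact fun h => hc h.symm)]
        rw [ih f (c :: cur) acc (Nat.lt_of_succ_lt_succ h)]
        simp [pvSplitParts, hc]

theorem pvSplitParts_ne_nil (pre l : List Char) : pvSplitParts pre l ≠ [] := by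
  induction l generalizing pre with
  | nil => simp [pvSplitParts]
  | cons c t ih =>
    simp only [pvSplitParts]
    split
    · simp
    · exact ih _

theorem pv_enum_foldl (n : Int) : ∀ (rest : List (List Char)) (k : Int) (acc : List Char),
    k + rest.length = n →
    (PySem.List.enumerate rest k).foldl
      (fun acc p =>
        let acc' := acc ++ PySem.Chars.lower p.2
        if p.1 < n - 1 then acc' ++ ['_'] else acc')
      acc = acc ++ pvJoinTail rest := by
  intro rest
  induction rest with
  | nil => intro k acc _; simp [PySem.List.enumerate, pvJoinTail]
  | cons a rest ih =>
    intro k acc h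
    simp only [PySem.List.enumerate, List.foldl_cons]
    cases rest with
    | nil =>
      have hk : ¬ (k < n - 1) := by simp at h; omega
      simp [PySem.List.enumerate, hk, pvJoinTail]
    | cons b t =>
      have hk : k < n - 1 := by simp at h; omega
      rw [if_pos hk]
      rw [ih (k + 1) _ (by simp at h ⊢; omega)]
      simp [pvJoinTail]

theorem pv_joinTail_splitParts : ∀ (l pre : List Char),
    pvJoinTail (pvSplitParts pre l) = PySem.Chars.lower pre ++ l.map pvF := by
  intro l
  induction l with
  | nil => intro pre; simp [pvSplitParts, pvJoinTail]
  | cons c t ih =>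
    intro pre
    by_cases hc : c = ' '
    · subst hc
      simp only [pvSplitParts, if_pos]
      obtain ⟨r, rs, hr⟩ : ∃ r rs, pvSplitParts [] t = r :: rs := by
        cases h : pvSplitParts [] t with
        | nil => exact absurd h (pvSplitParts_ne_nil [] t)
        | cons r rs => exact ⟨r, rs, rfl⟩
      rw [hr]
      show PySem.Chars.lower pre ++ '_' :: pvJoinTail (r :: rs) = _
      rw [← hr, ih []]
      simp [pvF, PySem.Chars.lower]
    · simp only [pvSplitParts, if_neg hc]
      rw [ih (pre ++ [c])]
      simp [pvF, hc, PySem.Chars.lower]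

theorem pv_map_pvG_lower (cs : List Char) :
    (PySem.Chars.lower cs).map pvG = cs.map pvF := by
  simp only [PySem.Chars.lower, List.map_map]
  apply List.map_congr_left
  intro c _
  by_cases hc : c = ' '
  · subst hc; decide
  · have : PySem.Chars.lowerChar c ≠ ' ' := fun h => hc ((pv_lowerChar_eq_space_iff c).mp h)
    simp [pvG, pvF, this, hc]

-- ===== VERDICT (by name: the statement is the Claim_ definition above) =====
theorem get_person_formatted_fullname_spec : Claim_equal_get_person_formatted_fullname := by
  intro s _
  unfold Spec_get_person_formatted_fullname get_person_formatted_fullname get_person_formatted_fullname_alt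
  simp only []
  have hsplit : PySem.Chars.splitOn s.toList [' '] = pvSplitParts [] s.toList := by
    unfold PySem.Chars.splitOn
    simpa using pv_splitOn_go_eq s.toList (s.toList.length + 1) [] [] (by omega)
  rw [hsplit]
  rw [pv_enum_foldl ((pvSplitParts [] s.toList).length : Int) (pvSplitParts [] s.toList) 0 []
      (by simp)]
  rw [PySem.Str.replace, PySem.Str.lower]
  have hB : (String.ofList (PySem.Chars.lower s.toList)).toList = PySem.Chars.lower s.toList := by
    simp
  simp only [List.nil_append]
  rw [pv_joinTail_splitParts s.toList []]
  congr 1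
  rw [hB]
  show s.toList.map pvF = PySem.Chars.replace (PySem.Chars.lower s.toList) (" ").toList ("_").toList
  rw [show (" ").toList = [' '] from rfl, show ("_").toList = ['_'] from rfl]
  rw [pv_replace_single_eq_map, pv_map_pvG_lower]
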